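-- pv_equiv track=rewrite | github.com/phipsi99/Advent-of-Code-2024 | 09/main.py | find_empty_sequence
-- ===== SOURCE A (Python) =====
-- def find_empty_sequence(arr, length):
--     current_sequence = 0
--     for i in range(len(arr)):
--         if arr[i] == '':
--             current_sequence += 1
--             if current_sequence == length:
--                 return i - length + 1
--         else:
--             current_sequence = 0
--     return -1
-- ===== SOURCE B (Python) =====
-- from itertools import groupby
--
-- def find_empty_sequence(arr, length):
--     if length <= 0:
--         return -1
--     start = 0
--     for is_empty, grp in groupby(arr, key=lambda x: x == ''):
--         n = sum(1 for _ in grp)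
--         if is_empty and n >= length:
--             return start
--         start += n
--     return -1
-- ===== Notes on version B (the rewrite author's own statement) =====
-- stated objective: alternative
-- what changed: B decomposes the array into maximal runs with itertools.groupby and returns the start of the first empty run at least `length` long (with a length<=0 guard, since A never matches non-positive lengths), instead of A's flat per-element counter scan.
import Mathlib
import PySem

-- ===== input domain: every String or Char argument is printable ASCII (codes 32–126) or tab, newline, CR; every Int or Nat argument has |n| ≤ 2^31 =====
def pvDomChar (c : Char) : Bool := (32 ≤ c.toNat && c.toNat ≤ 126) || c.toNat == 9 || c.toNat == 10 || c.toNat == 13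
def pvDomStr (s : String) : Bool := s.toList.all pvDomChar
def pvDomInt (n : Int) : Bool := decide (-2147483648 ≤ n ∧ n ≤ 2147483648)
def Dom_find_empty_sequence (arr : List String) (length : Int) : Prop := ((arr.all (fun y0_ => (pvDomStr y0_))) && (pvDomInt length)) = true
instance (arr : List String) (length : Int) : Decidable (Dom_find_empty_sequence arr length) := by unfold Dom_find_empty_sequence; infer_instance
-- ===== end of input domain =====

-- B replaces A's flat per-element counter scan by a decomposition into maximal runs
-- (groupby) returning the start of the first empty run of sufficient length (alternative
-- decomposition, same cost).

-- ===== PORT A =====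
-- loop over range(len(arr)) carrying index i and current_sequence
def findEmptyGoA (length : Int) : List String → Int → Int → Int
  | [], _, _ => -1
  | x :: xs, i, c =>
      if x = "" then
        let c' := c + 1
        if c' = length then i - length + 1 else findEmptyGoA length xs (i + 1) c'
      else findEmptyGoA length xs (i + 1) 0

def find_empty_sequence (arr : List String) (length : Int) : Int :=
  findEmptyGoA length arr 0 0

-- ===== PORT B =====
-- groupby: peel off the maximal run of the head's key, keeping a running start index
def findEmptyGoB (length : Int) : List String → Int → Int
  | [], _ => -1
  | x :: xs, start =>
      let b : Bool := decide (x = "")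
      let n := ((x :: xs).takeWhile (fun y => decide (y = "") == decide (x = ""))).length
      if b = true ∧ length ≤ (n : Int) then start
      else findEmptyGoB length ((x :: xs).drop n) (start + n)
  termination_by arr _ => arr.length
  decreasing_by
    simp only [List.length_drop, List.length_cons]
    have h1 : 0 < ((x :: xs).takeWhile (fun y => decide (y = "") == decide (x = ""))).length := by
      simp [List.takeWhile]
    omega

def find_empty_sequence_alt (arr : List String) (length : Int) : Int :=
  if length ≤ 0 then -1 else findEmptyGoB length arr 0

-- ===== PRECONDITION & SPEC =====
def Spec_find_empty_sequence (arr : List String) (length : Int) (out : Int) : Prop := out = find_empty_sequence_alt arr length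
instance (arr : List String) (length : Int) (out : Int) : Decidable (Spec_find_empty_sequence arr length out) := by unfold Spec_find_empty_sequence; infer_instance

-- ===== CLAIM (what is proved, stated in full; the proofs are below) =====
def Claim_equal_find_empty_sequence : Prop := ∀ (arr : List String) (length : Int), Dom_find_empty_sequence arr length → Spec_find_empty_sequence arr length (find_empty_sequence arr length)

-- ===== LEMMAS AND PROOFS =====

-- If length ≤ 0 the counter (kept ≥ 0) can never hit it: A returns -1.
theorem findEmptyGoA_nonpos (length : Int) (hl : length ≤ 0) :
    ∀ (arr : List String) (i c : Int), 0 ≤ c → findEmptyGoA length arr i c = -1 := by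
  intro arr
  induction arr with
  | nil => intro i c _; rfl
  | cons x xs ih =>
      intro i c hc
      by_cases hx : x = ""
      · have hne : ¬ (c + 1 = length) := by omega
        simp [findEmptyGoA, hx, hne]
        exact ih (i + 1) (c + 1) (by omega)
      · simp [findEmptyGoA, hx]
        exact ih (i + 1) 0 le_rfl

-- A run of n empty cells: either the counter reaches `length` inside it (returning i - c),
-- or the scan continues past it with counter c + n.
theorem findEmptyGoA_empty_run (length : Int) :
    ∀ (n : Nat) (rest : List String) (i c : Int), 0 ≤ c → c < length →
      findEmptyGoA length (List.replicate n "" ++ rest) i c =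
        if length ≤ c + n then i - c else findEmptyGoA length rest (i + n) (c + n) := by
  intro n
  induction n with
  | zero =>
      intro rest i c hc hcl
      rw [if_neg (by push_cast; omega)]
      simp
  | succ m ih =>
      intro rest i c hc hcl
      simp only [List.replicate_succ, List.cons_append, findEmptyGoA]
      by_cases heq : c + 1 = length
      · rw [if_pos trivial, if_pos heq, if_pos (by push_cast; omega)]
        omega
      · have hcl' : c + 1 < length := by omega
        rw [if_pos trivial, if_neg heq]
        rw [ih rest (i + 1) (c + 1) (by omega) hcl']
        have e1 : i + 1 + (m : Int) = i + ((m + 1 : Nat) : Int) := by push_cast; ring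
        have e2 : c + 1 + (m : Int) = c + ((m + 1 : Nat) : Int) := by push_cast; ring
        by_cases h2 : length ≤ c + 1 + (m : Int)
        · rw [if_pos h2, if_pos (by push_cast; omega)]
          omega
        · rw [if_neg h2, if_neg (by push_cast; omega), e1, e2]

-- The counter is irrelevant when the next cell is not empty (or the list ends).
theorem findEmptyGoA_reset (length : Int) (rest : List String) (i c : Int)
    (h : rest = [] ∨ ∃ y ys, rest = y :: ys ∧ y ≠ "") :
    findEmptyGoA length rest i c = findEmptyGoA length rest i 0 := by
  rcases h with h | ⟨y, ys, rfl, hy⟩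
  · subst h; rfl
  · simp [findEmptyGoA, hy]

theorem drop_length_takeWhile {α : Type} (p : α → Bool) (l : List α) :
    l.drop (l.takeWhile p).length = l.dropWhile p := by
  induction l with
  | nil => rfl
  | cons x xs ih =>
      by_cases hx : p x = true
      · simp [List.takeWhile, List.dropWhile, hx, ih]
      · simp [List.takeWhile, List.dropWhile, hx]

-- Stepping over a maximal run of non-empty cells leaves A's state at counter 0.
theorem findEmptyGoA_skip_run (length : Int) :
    ∀ (run rest : List String) (i : Int), (∀ y ∈ run, y ≠ "") →
      findEmptyGoA length (run ++ rest) i 0 = findEmptyGoA length rest (i + run.length) 0 := by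
  intro run
  induction run with
  | nil => intro rest i _; simp
  | cons x xs ih =>
      intro rest i h
      have hx : x ≠ "" := h x (by simp)
      simp only [List.cons_append, findEmptyGoA, if_neg hx]
      rw [ih rest (i + 1) (fun y hy => h y (by simp [hy]))]
      have e : i + 1 + (xs.length : Int) = i + (((x :: xs).length : Nat) : Int) := by
        simp [List.length_cons]; ring
      rw [e]

-- Main run-decomposition lemma: B's run scan equals A's counter scan (for positive length).
theorem findEmptyGoB_eq (length : Int) (hl : 1 ≤ length) :
    ∀ (N : Nat) (arr : List String), arr.length ≤ N → ∀ (start : Int),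
      findEmptyGoB length arr start = findEmptyGoA length arr start 0 := by
  intro N
  induction N with
  | zero =>
      intro arr hN start
      match arr with
      | [] => simp [findEmptyGoB, findEmptyGoA]
  | succ N IH =>
      intro arr hN start
      match arr with
      | [] => simp [findEmptyGoB, findEmptyGoA]
      | x :: xs =>
        rw [findEmptyGoB.eq_def]
        simp only []
        set b : Bool := decide (x = "") with hb
        set p : String → Bool := fun y => decide (y = "") == decide (x = "") with hp
        set run := (x :: xs).takeWhile p with hrun
        set n := run.length with hn
        have hdrop : (x :: xs).drop n = (x :: xs).dropWhile p := drop_length_takeWhile p _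
        have hsplit : run ++ (x :: xs).dropWhile p = x :: xs := List.takeWhile_append_dropWhile
        have hrest : ∀ y ys, (x :: xs).dropWhile p = y :: ys → p y = false := by
          intro y ys hdw
          have hne : (x :: xs).dropWhile p ≠ [] := by simp [hdw]
          have hh := List.head_dropWhile_not p hne
          have hhead : ((x :: xs).dropWhile p).head hne = y := by simp [hdw]
          rw [hhead] at hh; exact hh
        have hrunmem : ∀ y ∈ run, decide (y = "") = b := by
          intro y hy
          have := List.mem_takeWhile_imp (hrun ▸ hy)
          simpa [hp, hb] using this
        have hn1 : 1 ≤ n := by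
          have hpx : p x = true := by simp [hp]
          simp [hn, hrun, List.takeWhile, hpx]
        have hlen : ((x :: xs).drop n).length ≤ N := by
          rw [List.length_drop]
          have hxl : (x :: xs).length = xs.length + 1 := by simp
          omega
        have hIH := IH ((x :: xs).drop n) hlen (start + n)
        by_cases hbe : b = true
        · -- empty run
          have hall : run = List.replicate n "" := by
            rw [hn]
            apply List.eq_replicate_of_mem
            intro y hy
            have := hrunmem y hy
            rw [hbe] at this; simpa using this
          have hrne : ∀ y ys, (x :: xs).dropWhile p = y :: ys → y ≠ "" := by
            intro y ys hdw hcon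
            have := hrest y ys hdw
            rw [hcon] at this; simp [hp] at this
            rw [hb] at hbe; simp at hbe; exact this hbe
          have hresetable : (x :: xs).dropWhile p = [] ∨
              ∃ y ys, (x :: xs).dropWhile p = y :: ys ∧ y ≠ "" := by
            rcases hdw : (x :: xs).dropWhile p with _ | ⟨y, ys⟩
            · exact Or.inl rfl
            · exact Or.inr ⟨y, ys, rfl, hrne y ys hdw⟩
          by_cases hle : length ≤ (n : Int)
          · rw [if_pos ⟨hbe, hle⟩]
            conv_rhs => rw [← hsplit, hall]
            rw [findEmptyGoA_empty_run length n _ start 0 le_rfl (by omega)]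
            rw [if_pos (by omega)]
            omega
          · rw [if_neg (by tauto)]
            conv_rhs => rw [← hsplit, hall]
            rw [findEmptyGoA_empty_run length n _ start 0 le_rfl (by omega)]
            rw [if_neg (by omega)]
            rw [findEmptyGoA_reset length _ _ _ hresetable]
            rw [hIH, hdrop]
        · -- non-empty run
          have hbf : b = false := by simpa using hbe
          have hallne : ∀ y ∈ run, y ≠ "" := by
            intro y hy hcon
            have := hrunmem y hy
            rw [hcon, hbf] at this; simp at this
          rw [if_neg (by rw [hbf]; simp)]
          conv_rhs => rw [← hsplit]
          rw [findEmptyGoA_skip_run length run _ start hallne]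
          rw [hIH, hdrop, hn]

-- ===== VERDICT (by name: the statement is the Claim_ definition above) =====
theorem find_empty_sequence_spec : Claim_equal_find_empty_sequence := by
  intro arr length _
  unfold Spec_find_empty_sequence find_empty_sequence find_empty_sequence_alt
  by_cases hl : length ≤ 0
  · rw [if_pos hl]
    exact findEmptyGoA_nonpos length hl arr 0 0 le_rfl
  · rw [if_neg hl]
    exact (findEmptyGoB_eq length (by omega) arr.length arr le_rfl 0).symm
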